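-- pv_equiv track=rewrite | github.com/rakeshselvaraj0108/Breast-Cancer-prediction | app.py | normalize_col_name
-- ===== SOURCE A (Python) =====
-- def normalize_col_name(s: str):
--     # Lowercase, strip, remove punctuation, common synonyms
--     if not isinstance(s, str):
--         return str(s)
--     s = s.strip().lower()
--     replacements = {
--         ' ': '_',
--         '-': '_',
--         '/': '_',
--         'mean_': 'mean_',
--     }
--     for k, v in replacements.items():
--         s = s.replace(k, v)
--     # remove parentheses and percent signs
--     for ch in '()%':
--         s = s.replace(ch, '')
--     return s
-- ===== SOURCE B (Python) =====
-- def normalize_col_name(s: str):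
--     if not isinstance(s, str):
--         return str(s)
--     s = s.strip().lower()
--     out = []
--     for c in s:
--         if c in ' -/':
--             out.append('_')
--         elif c in '()%':
--             continue
--         else:
--             out.append(c)
--     return ''.join(out)
-- ===== Notes on version B (the rewrite author's own statement) =====
-- stated objective: alternative
-- what changed: Replaces A's chain of sequential str.replace scans (plus a no-op 'mean_' replacement) with one explicit character-by-character pass that maps ' -/' to '_', drops '()%' and keeps everything else.
import Mathlib
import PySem

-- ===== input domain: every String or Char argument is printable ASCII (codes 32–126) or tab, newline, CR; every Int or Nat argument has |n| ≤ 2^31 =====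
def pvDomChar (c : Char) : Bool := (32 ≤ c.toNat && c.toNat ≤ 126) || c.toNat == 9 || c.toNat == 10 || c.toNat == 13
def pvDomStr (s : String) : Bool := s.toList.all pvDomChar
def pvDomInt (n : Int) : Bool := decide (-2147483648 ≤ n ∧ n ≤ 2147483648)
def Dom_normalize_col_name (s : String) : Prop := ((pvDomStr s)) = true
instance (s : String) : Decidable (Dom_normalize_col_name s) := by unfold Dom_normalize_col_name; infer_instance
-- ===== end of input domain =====

-- B replaces A's chain of sequential str.replace scans (incl. a no-op 'mean_' replacement)
-- with one explicit character-by-character pass; alternative decomposition, same result.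


-- ===== PORT A =====
-- literal transliteration: strip+lower, then the replacement dict folded in insertion
-- order, then a fold over the characters of "()%" deleting each.
def normalize_col_name (s : String) : String :=
  let s1 := PySem.Str.lower (PySem.Str.strip s)
  let replacements : PySem.Dict String String :=
    ((((PySem.Dict.empty).insert " " "_").insert "-" "_").insert "/" "_").insert "mean_" "mean_"
  let s2 := replacements.items.foldl (fun acc kv => PySem.Str.replace acc kv.1 kv.2) s1
  let s3 := "()%".toList.foldl (fun acc ch => PySem.Str.replace acc (String.mk [ch]) "") s2
  s3

-- ===== PORT B =====
-- transliteration of Source B: strip+lower, then one fold over the characters building the output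
def normalize_col_name_alt (s : String) : String :=
  let t := PySem.Str.lower (PySem.Str.strip s)
  String.mk (t.toList.foldl (fun acc c =>
    if c = ' ' ∨ c = '-' ∨ c = '/' then acc ++ ['_']
    else if c = '(' ∨ c = ')' ∨ c = '%' then acc
    else acc ++ [c]) [])

-- ===== PRECONDITION & SPEC =====
def Spec_normalize_col_name (s : String) (out : String) : Prop := out = normalize_col_name_alt s
instance (s : String) (out : String) : Decidable (Spec_normalize_col_name s out) := by unfold Spec_normalize_col_name; infer_instance

-- ===== CLAIM (what is proved, stated in full; the proofs are below) =====
def Claim_equal_normalize_col_name : Prop := ∀ (s : String), Dom_normalize_col_name s → Spec_normalize_col_name s (normalize_col_name s)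

-- ===== LEMMAS AND PROOFS =====

/-- `replace.go` with a single-char pattern and enough fuel is a flatMap. -/
lemma go_single (c : Char) (new : List Char) :
    ∀ (l acc : List Char) (fuel : Nat), l.length ≤ fuel →
      PySem.Chars.replace.go [c] new fuel l acc
        = acc.reverse ++ l.flatMap (fun x => if x = c then new else [x]) := by
  intro l
  induction l with
  | nil => intro acc fuel _; cases fuel <;> simp [PySem.Chars.replace.go]
  | cons c' t ih =>
    intro acc fuel hf
    cases fuel with
    | zero => simp at hf
    | succ fuel =>
      simp only [PySem.Chars.replace.go, List.isPrefixOf]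
      by_cases h : c = c'
      · rw [if_pos (by simp [h])]
        simp only [List.length_singleton, List.drop_succ_cons, List.drop_zero]
        rw [ih (new.reverse ++ acc) fuel (by simpa using Nat.le_of_succ_le_succ hf)]
        simp [h.symm]
      · rw [if_neg (by simp [h])]
        rw [ih (c' :: acc) fuel (by simpa using Nat.le_of_succ_le_succ hf)]
        simp [if_neg (fun hh : c' = c => h hh.symm)]

/-- single-char `replace` on lists is a flatMap -/
lemma replace_single (c : Char) (new l : List Char) :
    PySem.Chars.replace l [c] new = l.flatMap (fun x => if x = c then new else [x]) := by
  simp only [PySem.Chars.replace, List.isEmpty_cons, Bool.false_eq_true, if_neg,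
    not_false_eq_true]
  simpa using go_single c new l [] l.length le_rfl

/-- `replace.go` with old = new is the identity (enough fuel, nonempty pattern). -/
lemma go_self (old : List Char) (hne : old ≠ []) :
    ∀ (fuel : Nat) (l acc : List Char), l.length ≤ fuel →
      PySem.Chars.replace.go old old fuel l acc = acc.reverse ++ l := by
  intro fuel
  induction fuel with
  | zero =>
    intro l acc hl
    have hnil : l = [] := List.eq_nil_of_length_eq_zero (Nat.le_zero.mp hl)
    subst hnil; simp [PySem.Chars.replace.go]
  | succ fuel ih =>
    intro l acc hl
    cases l with
    | nil => simp [PySem.Chars.replace.go]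
    | cons c t =>
      simp only [PySem.Chars.replace.go]
      by_cases hp : old.isPrefixOf (c :: t) = true
      · rw [if_pos hp]
        have hpre : old <+: (c :: t) := List.isPrefixOf_iff_prefix.mp hp
        obtain ⟨r, hr⟩ := hpre
        have hdrop : List.drop old.length (c :: t) = r := by
          rw [← hr]; simp
        rw [hdrop, ih r (old.reverse ++ acc) (by
          have h0 : old.length + r.length = t.length + 1 := by
            have := congrArg List.length hr; simpa using this
          have h1 : 1 ≤ old.length := by
            cases old with | nil => exact absurd rfl hne | cons _ _ => simp
          have h2 : t.length + 1 ≤ fuel + 1 := by simpa using hl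
          omega)]
        rw [← hr]; simp
      · rw [if_neg hp]
        rw [ih t (c :: acc) (by simpa using Nat.le_of_succ_le_succ hl)]
        simp

lemma replace_self (l old : List Char) :
    PySem.Chars.replace l old old = l := by
  by_cases h : old = []
  · subst h
    simp only [PySem.Chars.replace, List.isEmpty_nil, if_pos, List.nil_append]
    induction l with
    | nil => simp
    | cons c t ih => simp [ih]
  · have h' : old.isEmpty = false := by simpa [List.isEmpty_iff] using h
    simp only [PySem.Chars.replace, h', Bool.false_eq_true, if_neg, not_false_eq_true]
    simpa using go_self old h l.length l [] le_rfl

/-- the per-character mapping B effectively applies -/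
def gmap (c : Char) : List Char :=
  if c = ' ' ∨ c = '-' ∨ c = '/' then ['_']
  else if c = '(' ∨ c = ')' ∨ c = '%' then []
  else [c]

lemma toList_mk (l : List Char) : (String.mk l).toList = l := Eq.symm (String.ofList_eq.mp rfl)

lemma foldl_gmap (l acc : List Char) :
    l.foldl (fun acc c =>
      if c = ' ' ∨ c = '-' ∨ c = '/' then acc ++ ['_']
      else if c = '(' ∨ c = ')' ∨ c = '%' then acc
      else acc ++ [c]) acc = acc ++ l.flatMap gmap := by
  induction l generalizing acc with
  | nil => simp
  | cons c t ih =>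
    simp only [List.foldl_cons, List.flatMap_cons, ih, gmap]
    split_ifs <;> simp

lemma chain_eq_gmap (t : List Char) :
    (((((((t.flatMap (fun x => if x = ' ' then ['_'] else [x])).flatMap
        (fun x => if x = '-' then ['_'] else [x])).flatMap
        (fun x => if x = '/' then ['_'] else [x])).flatMap
        (fun x => if x = '(' then [] else [x])).flatMap
        (fun x => if x = ')' then [] else [x])).flatMap
        (fun x => if x = '%' then [] else [x]))) = t.flatMap gmap := by
  simp only [List.flatMap_assoc]
  apply List.flatMap_congr
  intro x _
  by_cases h1 : x = ' '
  · subst h1; decide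
  by_cases h2 : x = '-'
  · subst h2; decide
  by_cases h3 : x = '/'
  · subst h3; decide
  by_cases h4 : x = '('
  · subst h4; decide
  by_cases h5 : x = ')'
  · subst h5; decide
  by_cases h6 : x = '%'
  · subst h6; decide
  simp [gmap, h1, h2, h3, h4, h5, h6]

-- ===== VERDICT (by name: the statement is the Claim_ definition above) =====
theorem normalize_col_name_spec : Claim_equal_normalize_col_name := by
  intro s _
  unfold Spec_normalize_col_name normalize_col_name normalize_col_name_alt
  apply String.toList_inj.mp
  have hitems :
      (((((PySem.Dict.empty : PySem.Dict String String).insert " " "_").insert "-" "_").insert "/" "_").insert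
          "mean_" "mean_").items
        = [(" ", "_"), ("-", "_"), ("/", "_"), ("mean_", "mean_")] := by rfl
  simp only [hitems, List.foldl_cons, List.foldl_nil,
    show "()%".toList = ['(', ')', '%'] from rfl, toList_mk,
    PySem.Str.toList_replace, show (String.mk ['(']).toList = ['('] from rfl,
    show (String.mk [')']).toList = [')'] from rfl,
    show (String.mk ['%']).toList = ['%'] from rfl,
    show (" " : String).toList = [' '] from rfl,
    show ("-" : String).toList = ['-'] from rfl,
    show ("/" : String).toList = ['/'] from rfl,
    show ("_" : String).toList = ['_'] from rfl,
    show ("" : String).toList = [] from rfl]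
  rw [replace_self]
  rw [replace_single, replace_single, replace_single, replace_single, replace_single,
    replace_single]
  rw [foldl_gmap]
  simpa using (chain_eq_gmap (PySem.Str.lower (PySem.Str.strip s)).toList)
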